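-- pv_equiv track=rewrite | github.com/PilumEight/duplicate_search | minefive.py | sorted_dict
-- ===== SOURCE A (Python) =====
-- def sorted_dict(just): #SECOND ACTION!!!!!!!!!!!!!!!!!!!!!!!!!!!!!!!!!!!!!!!!!!!!!!!!!!!!
--     new_dict = {}
--     old_dict = {}
--     for i in just:
--         new_dict[i[1]] = []
--     for i in just:
--         new_dict[i[1]].append(i[0]) #массив где количество памяти - ключ, ячейки - значения
--     for i in new_dict:
--         if len(new_dict[i]) > 1:
--             old_dict[i] = new_dict[i] # количество файлы которые весят одинаково
--     return old_dict
-- ===== SOURCE B (Python) =====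
-- def sorted_dict(just):
--     seen = set()
--     result = {}
--     for _, k in just:
--         if k not in seen:
--             seen.add(k)
--             vals = [v for v, k2 in just if k2 == k]
--             if len(vals) > 1:
--                 result[k] = vals
--     return result
-- ===== Notes on version B (the rewrite author's own statement) =====
-- stated objective: alternative
-- what changed: B never builds a grouping dict incrementally: it walks the input once over first occurrences of keys (a seen-set), and for each new key gathers its whole group by one comprehension scan of the input, keeping it only if it has more than one element; A instead builds all groups by per-element dict appends and filters them in a third pass.
import Mathlib
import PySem

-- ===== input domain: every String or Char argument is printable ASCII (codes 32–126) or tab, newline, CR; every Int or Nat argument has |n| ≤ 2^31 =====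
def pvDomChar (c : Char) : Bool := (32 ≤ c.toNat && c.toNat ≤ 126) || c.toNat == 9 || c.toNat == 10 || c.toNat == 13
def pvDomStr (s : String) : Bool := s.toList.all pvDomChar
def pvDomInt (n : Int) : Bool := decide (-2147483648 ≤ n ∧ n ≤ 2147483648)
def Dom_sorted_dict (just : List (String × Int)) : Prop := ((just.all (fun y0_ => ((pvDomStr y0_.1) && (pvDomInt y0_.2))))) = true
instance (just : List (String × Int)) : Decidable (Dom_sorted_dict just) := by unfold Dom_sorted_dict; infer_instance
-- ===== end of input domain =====

-- B replaces A's incremental group-building dict (append per element, then a filter pass over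
-- the dict) by a first-occurrence walk with a seen-set that gathers each key's whole group by
-- one comprehension scan of the input; same result, a different traversal (alternative, not faster).

-- ===== PORT A =====
def sorted_dict (just : List (String × Int)) : List (Int × List String) :=
  -- new_dict = {}; for i in just: new_dict[i[1]] = []
  let nd0 : PySem.Dict Int (List String) :=
    just.foldl (fun d i => d.insert i.2 []) PySem.Dict.empty
  -- for i in just: new_dict[i[1]].append(i[0])   (key always present; in-place append = modify)
  let new_dict : PySem.Dict Int (List String) :=
    just.foldl (fun d i => d.modify i.2 [] (fun l => l ++ [i.1])) nd0
  -- old_dict = {}; for i in new_dict: if len(new_dict[i]) > 1: old_dict[i] = new_dict[i]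
  let old_dict : PySem.Dict Int (List String) :=
    new_dict.keys.foldl
      (fun od k => if (new_dict.getD k []).length > 1 then od.insert k (new_dict.getD k []) else od)
      PySem.Dict.empty
  old_dict.items

-- ===== PORT B =====
def sorted_dict_alt (just : List (String × Int)) : List (Int × List String) :=
  -- seen = set(); result = {}
  -- for _, k in just:
  --     if k not in seen:
  --         seen.add(k)
  --         vals = [v for v, k2 in just if k2 == k]
  --         if len(vals) > 1: result[k] = vals
  let st : PySem.Set Int × PySem.Dict Int (List String) :=
    just.foldl
      (fun st i =>
        if i.2 ∈ st.1 then st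
        else
          let seen := PySem.Set.add st.1 i.2
          let vals := (just.filter (fun p => p.2 == i.2)).map (·.1)
          if vals.length > 1 then (seen, st.2.insert i.2 vals) else (seen, st.2))
      (PySem.Set.empty, PySem.Dict.empty)
  st.2.items

-- ===== PRECONDITION & SPEC =====
def Spec_sorted_dict (just : List (String × Int)) (out : List (Int × List String)) : Prop := out = sorted_dict_alt just
instance (just : List (String × Int)) (out : List (Int × List String)) : Decidable (Spec_sorted_dict just out) := by unfold Spec_sorted_dict; infer_instance

-- ===== CLAIM =====
def Claim_equal_sorted_dict : Prop := ∀ (just : List (String × Int)), Dom_sorted_dict just → Spec_sorted_dict just (sorted_dict just)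

-- ===== LEMMAS AND PROOFS =====

-- shared ingredients: the key multiset and the group of a key
def pvKm (just : List (String × Int)) : List Int := just.map (·.2)
def pvVals (just : List (String × Int)) (k : Int) : List String :=
  (just.filter (fun i => i.2 == k)).map (·.1)

-- the elements of l NOT in s, first occurrences, in order (what a seen-set walk emits)
def pvNew (s : List Int) : List Int → List Int
  | [] => []
  | x :: t => if x ∈ s then pvNew s t else x :: pvNew (s ++ [x]) t

-- Set.update appends exactly the fresh first occurrences
lemma pv_update_eq (l : List Int) : ∀ (s : PySem.Set Int),
    PySem.Set.update s l = s ++ pvNew s l := by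
  induction l with
  | nil => intro s; simp [PySem.Set.update_nil, pvNew]
  | cons x t ih =>
      intro s
      rw [PySem.Set.update_cons]
      by_cases hx : x ∈ s
      · rw [PySem.Set.add_of_mem hx, ih s]
        simp [pvNew, hx]
      · rw [PySem.Set.add_of_not_mem hx, ih (s ++ [x])]
        simp [pvNew, hx]

lemma pv_ofList_eq_pvNew (l : List Int) :
    PySem.Set.ofList l = pvNew [] l := by
  rw [PySem.Set.ofList_eq_foldl]
  have := pv_update_eq l ([] : PySem.Set Int)
  rw [PySem.Set.update] at this
  simpa using this

-- ===== A-side characterisation =====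

-- A's first loop leaves every key mapped to []
lemma pv_getD_initloop (l : List (String × Int)) (d : PySem.Dict Int (List String))
    (h : ∀ k, d.getD k [] = []) (k : Int) :
    (l.foldl (fun d i => d.insert i.2 ([] : List String)) d).getD k [] = [] := by
  induction l generalizing d with
  | nil => exact h k
  | cons a t ih =>
      simp only [List.foldl_cons]
      refine ih _ (fun k' => ?_)
      rw [PySem.Dict.getD_insert]
      split <;> simp [h]

-- A's new_dict maps k to the group pvVals just k
lemma pv_newdict_getD (just : List (String × Int)) (k : Int) :
    ((just.foldl (fun d i => d.modify i.2 [] (fun l => l ++ [i.1]))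
        (just.foldl (fun d i => d.insert i.2 ([] : List String)) PySem.Dict.empty))).getD k []
      = pvVals just k := by
  have hmap : just.foldl (fun d i => d.modify i.2 [] (fun l => l ++ [i.1]))
        (just.foldl (fun d i => d.insert i.2 ([] : List String)) PySem.Dict.empty)
      = (just.map Prod.swap).foldl (fun d p => d.modify p.1 [] (fun l => l ++ [p.2]))
        (just.foldl (fun d i => d.insert i.2 ([] : List String)) PySem.Dict.empty) := by
    rw [List.foldl_map]; rfl
  rw [hmap, PySem.Dict.getD_foldl_modify_append,
      pv_getD_initloop _ _ (fun k => PySem.Dict.getD_empty k [])]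
  simp [pvVals, List.filter_map, List.map_map, Function.comp_def, Prod.swap]

-- update by a list of already-present elements is the identity
lemma pv_set_update_of_subset (l : List Int) : ∀ (s : PySem.Set Int), (∀ x ∈ l, x ∈ s) →
    PySem.Set.update s l = s := by
  induction l with
  | nil => intro s _; exact PySem.Set.update_nil s
  | cons x t ih =>
      intro s h
      rw [PySem.Set.update_cons, PySem.Set.add_of_mem (h x (by simp))]
      exact ih s (fun y hy => h y (by simp [hy]))

-- keys of A's new_dict: the distinct keys in first-appearance order
lemma pv_newdict_keys (just : List (String × Int)) :
    ((just.foldl (fun d i => d.modify i.2 [] (fun l => l ++ [i.1]))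
        (just.foldl (fun d i => d.insert i.2 ([] : List String)) PySem.Dict.empty))).keys
      = PySem.Set.ofList (pvKm just) := by
  rw [PySem.Dict.keys_foldl_modify_key just (·.2) [] (fun d i l => l ++ [i.1]),
      PySem.Dict.keys_foldl_insert_key just (·.2) (fun _ _ => ([] : List String))]
  have h0 : (PySem.Dict.empty : PySem.Dict Int (List String)).keys = [] := rfl
  rw [h0]
  have h1 : PySem.Set.update ([] : PySem.Set Int) (just.map (·.2)) = PySem.Set.ofList (pvKm just) := by
    rw [PySem.Set.ofList_eq_foldl]; rfl
  rw [h1, pv_set_update_of_subset]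
  intro x hx
  rw [PySem.Set.mem_ofList]
  exact hx

-- A's third loop: conditional insertion of fresh distinct keys = filter-then-map on items
lemma pv_items_foldl_filter_insert (V : Int → List String) (cond : Int → Prop)
    [DecidablePred cond] :
    ∀ (K : List Int) (d : PySem.Dict Int (List String)),
    K.Nodup → (∀ k ∈ K, d.contains k = false) →
    (K.foldl (fun od k => if cond k then od.insert k (V k) else od) d).items
      = d.items ++ (K.filter (fun k => cond k)).map (fun k => (k, V k)) := by
  intro K
  induction K with
  | nil => intro d _ _; simp
  | cons k t ih =>
      intro d hnd hfresh
      have hk : d.contains k = false := hfresh k (by simp)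
      have hknot : k ∉ t := (List.nodup_cons.mp hnd).1
      simp only [List.foldl_cons, List.filter_cons]
      by_cases hc : cond k
      · rw [if_pos hc]
        have hfresh' : ∀ k' ∈ t, (d.insert k (V k)).contains k' = false := by
          intro k' hk'
          rw [PySem.Dict.contains_insert]
          have : k' ≠ k := fun h => hknot (h ▸ hk')
          simp [this, hfresh k' (by simp [hk'])]
        rw [ih _ ((List.nodup_cons.mp hnd).2) hfresh',
            PySem.Dict.items_insert_of_not_contains d (V k) hk]
        simp [hc]
      · rw [if_neg hc, ih _ ((List.nodup_cons.mp hnd).2) (fun k' hk' => hfresh k' (by simp [hk']))]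
        simp [hc]

-- A reduced to the canonical filtered-distinct-keys map
lemma pv_A_eq (just : List (String × Int)) :
    sorted_dict just
      = ((PySem.Set.ofList (pvKm just)).filter
          (fun k => decide (1 < (pvVals just k).length))).map (fun k => (k, pvVals just k)) := by
  unfold sorted_dict
  simp only []
  rw [pv_items_foldl_filter_insert _ _ _ _
        (by rw [pv_newdict_keys]; exact PySem.Set.nodup_ofList _)
        (fun k _ => PySem.Dict.contains_empty k)]
  rw [show (PySem.Dict.empty : PySem.Dict Int (List String)).items = [] from rfl,
      List.nil_append, pv_newdict_keys]
  rw [List.filter_congr (fun k _ => by rw [pv_newdict_getD])]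
  apply List.map_congr_left
  intro k _
  rw [pv_newdict_getD]

-- ===== B-side characterisation =====

-- the seen-set loop, unrolled: it emits exactly the fresh first occurrences pvNew, filtered
lemma pv_Bloop (just : List (String × Int)) :
    ∀ (l : List (String × Int)) (seen : PySem.Set Int) (out : PySem.Dict Int (List String)),
    (∀ k ∈ out.keys, k ∈ seen) →
    ((l.foldl
        (fun (st : PySem.Set Int × PySem.Dict Int (List String)) i =>
          if i.2 ∈ st.1 then st
          else
            let seen := PySem.Set.add st.1 i.2
            let vals := (just.filter (fun p => p.2 == i.2)).map (·.1)
            if vals.length > 1 then (seen, st.2.insert i.2 vals) else (seen, st.2))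
        (seen, out)).2).items
      = out.items
        ++ ((pvNew seen (l.map (·.2))).filter
              (fun k => decide (1 < (pvVals just k).length))).map (fun k => (k, pvVals just k)) := by
  intro l
  induction l with
  | nil => intro seen out _; simp [pvNew]
  | cons i t ih =>
      intro seen out hinv
      simp only [List.foldl_cons, List.map_cons]
      by_cases hmem : i.2 ∈ seen
      · rw [if_pos hmem, ih seen out hinv]
        simp [pvNew, hmem]
      · rw [if_neg hmem]
        have hvals : (just.filter (fun p => p.2 == i.2)).map (·.1) = pvVals just i.2 := rfl
        have hadd : PySem.Set.add seen i.2 = seen ++ [i.2] := PySem.Set.add_of_not_mem hmem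
        have hnewd : pvNew seen (i.2 :: t.map (·.2))
            = i.2 :: pvNew (seen ++ [i.2]) (t.map (·.2)) := by simp [pvNew, hmem]
        simp only [hvals]
        by_cases hc : (pvVals just i.2).length > 1
        · rw [if_pos hc]
          have hcontains : out.contains i.2 = false := by
            by_contra h
            exact hmem (hinv i.2 ((PySem.Dict.contains_iff_mem_keys out i.2).mp (by simpa using h)))
          have hinv' : ∀ k ∈ (out.insert i.2 (pvVals just i.2)).keys, k ∈ PySem.Set.add seen i.2 := by
            intro k hk
            rw [PySem.Dict.keys_insert_of_not_contains out _ hcontains] at hk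
            rw [hadd]
            rcases List.mem_append.mp hk with h1 | h2
            · exact List.mem_append.mpr (Or.inl (hinv k h1))
            · exact List.mem_append.mpr (Or.inr h2)
          rw [ih (PySem.Set.add seen i.2) _ hinv',
              PySem.Dict.items_insert_of_not_contains out _ hcontains, hadd, hnewd]
          simp [hc]
        · rw [if_neg hc]
          have hinv' : ∀ k ∈ out.keys, k ∈ PySem.Set.add seen i.2 := by
            intro k hk
            rw [hadd]
            exact List.mem_append.mpr (Or.inl (hinv k hk))
          rw [ih (PySem.Set.add seen i.2) out hinv', hadd, hnewd]
          simp [hc]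

lemma pv_B_eq (just : List (String × Int)) :
    sorted_dict_alt just
      = ((PySem.Set.ofList (pvKm just)).filter
          (fun k => decide (1 < (pvVals just k).length))).map (fun k => (k, pvVals just k)) := by
  unfold sorted_dict_alt
  simp only []
  rw [pv_Bloop just just PySem.Set.empty PySem.Dict.empty (by intro k hk; simp at hk)]
  rw [show (PySem.Dict.empty : PySem.Dict Int (List String)).items = [] from rfl, List.nil_append]
  have h : pvNew PySem.Set.empty (just.map (fun x => x.2)) = PySem.Set.ofList (pvKm just) := by
    rw [pv_ofList_eq_pvNew]; rfl
  rw [h]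

-- ===== VERDICT =====
theorem sorted_dict_spec : Claim_equal_sorted_dict := by
  intro just _
  unfold Spec_sorted_dict
  rw [pv_A_eq, pv_B_eq]
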